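-- pv_equiv track=rewrite | github.com/cheuora/Vue_Analyzingcontext | backend/libs/getPatternAndWrite_second.py | setResultValueFirst
-- ===== SOURCE A (Python) =====
-- def setResultValueFirst(arrayData, resultValue, targetRow ):
--     '''
--     Results의 값을 받아서 해당 값이 우선적으로 리스트에 먼저 오도록 정렬하여 돌려준다.
--     '''
--     leng = len(arrayData[targetRow]) #targetRow의 데이터를 변경한다.
--     findHitArrr = []
--     otherArrr = []
--     for i in range(leng):
--         k = arrayData[targetRow][i][-1].split(',')
--         if k[-1] == resultValue:
--             findHitArrr.append(arrayData[targetRow][i])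
--         else :
--             otherArrr.append(arrayData[targetRow][i])
--
--
--     returnArrr = findHitArrr + otherArrr
--
--     arrayData[targetRow] = returnArrr
--
--     return arrayData
-- ===== SOURCE B (Python) =====
-- def setResultValueFirst(arrayData, resultValue, targetRow):
--     # Stable sort keyed on the match predicate: matching rows (key False) come
--     # first, original order preserved within each group (sort stability).
--     arrayData[targetRow] = sorted(arrayData[targetRow],
--                                   key=lambda row: row[-1].split(',')[-1] != resultValue)
--     return arrayData
-- ===== Notes on version B (the rewrite author's own statement) =====
-- stated objective: simpler
-- what changed: Replaces the explicit two-accumulator partition loop with a single stable sort keyed on the boolean mismatch predicate; stability keeps the original order inside each group.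
import Mathlib
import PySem

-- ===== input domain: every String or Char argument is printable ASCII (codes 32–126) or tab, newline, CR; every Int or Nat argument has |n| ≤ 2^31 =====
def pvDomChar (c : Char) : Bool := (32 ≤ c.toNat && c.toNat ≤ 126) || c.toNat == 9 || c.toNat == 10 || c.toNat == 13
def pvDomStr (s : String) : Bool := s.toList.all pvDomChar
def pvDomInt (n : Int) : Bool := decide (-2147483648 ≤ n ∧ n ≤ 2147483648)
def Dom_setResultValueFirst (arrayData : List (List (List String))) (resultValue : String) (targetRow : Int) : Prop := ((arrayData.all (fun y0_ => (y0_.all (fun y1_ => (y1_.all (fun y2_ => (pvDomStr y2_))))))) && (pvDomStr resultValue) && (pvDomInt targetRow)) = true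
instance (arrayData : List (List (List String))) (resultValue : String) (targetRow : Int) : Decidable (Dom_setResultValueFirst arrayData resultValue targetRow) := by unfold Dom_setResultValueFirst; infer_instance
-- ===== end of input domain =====

-- B replaces A's two-accumulator partition loop with one stable sort keyed on the
-- mismatch predicate (simpler); equivalence of the RETURN value (both also mutate
-- arrayData[targetRow] in Python, identically).


-- ===== PORT A =====
-- row[-1].split(',')[-1] == resultValue  (the test both Python versions perform)
def pvHit (resultValue : String) (row : List String) : Bool :=
  (((PySem.Str.split? ((PySem.List.pyGet? row (-1)).getD "") ",").getD []).getLastD "") == resultValue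

-- one iteration of A's loop body on the pair (findHitArrr, otherArrr)
def pvStep (resultValue : String) (acc : List (List String) × List (List String))
    (row : List String) : List (List String) × List (List String) :=
  if pvHit resultValue row then (acc.1 ++ [row], acc.2) else (acc.1, acc.2 ++ [row])

def setResultValueFirst (arrayData : List (List (List String))) (resultValue : String) (targetRow : Int) : List (List (List String)) :=
  let target := (PySem.List.pyGet? arrayData targetRow).getD []
  let leng := target.length
  let p := (PySem.List.pyRange 0 (leng : Int) 1).foldl
      (fun acc i => pvStep resultValue acc (PySem.List.pyGetD target i [])) ([], [])
  PySem.List.pySetD arrayData targetRow (p.1 ++ p.2)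

-- ===== PORT B =====
-- Python's bool sort key (False before True) ported as the Int key 0/1.
def setResultValueFirst_alt (arrayData : List (List (List String))) (resultValue : String) (targetRow : Int) : List (List (List String)) :=
  let target := (PySem.List.pyGet? arrayData targetRow).getD []
  PySem.List.pySetD arrayData targetRow
    (PySem.List.sorted target (fun row => if pvHit resultValue row then (0 : Int) else 1))

-- ===== PRECONDITION & SPEC =====
-- Pre_ excludes exactly where the Python A raises: targetRow out of range (IndexError)
-- or an empty row in the target row (IndexError on row[-1]).
def Pre_setResultValueFirst (arrayData : List (List (List String))) (resultValue : String) (targetRow : Int) : Prop :=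
  PySem.Raise.InRange arrayData.length targetRow ∧
  ∀ row ∈ (PySem.List.pyGet? arrayData targetRow).getD [], row ≠ []
instance (arrayData : List (List (List String))) (resultValue : String) (targetRow : Int) : Decidable (Pre_setResultValueFirst arrayData resultValue targetRow) := by unfold Pre_setResultValueFirst; infer_instance

def pvWitness_setResultValueFirst : List (List (List String)) × String × Int :=
  ([[["a", "x,y"], ["b", "z"]], [["c"]]], "y", 0)

def Spec_setResultValueFirst (arrayData : List (List (List String))) (resultValue : String) (targetRow : Int) (out : List (List (List String))) : Prop := out = setResultValueFirst_alt arrayData resultValue targetRow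
instance (arrayData : List (List (List String))) (resultValue : String) (targetRow : Int) (out : List (List (List String))) : Decidable (Spec_setResultValueFirst arrayData resultValue targetRow out) := by unfold Spec_setResultValueFirst; infer_instance

-- ===== CLAIM (what is proved, stated in full; the proofs are below) =====
def Claim_equal_setResultValueFirst : Prop := ∀ (arrayData : List (List (List String))) (resultValue : String) (targetRow : Int), Dom_setResultValueFirst arrayData resultValue targetRow → Pre_setResultValueFirst arrayData resultValue targetRow → Spec_setResultValueFirst arrayData resultValue targetRow (setResultValueFirst arrayData resultValue targetRow)

-- ===== LEMMAS AND PROOFS =====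

-- inserting x between the group it does not go before and the group it goes before
theorem pv_insertBy_middle {α : Type} (before : α → α → Bool) (x : α) (f0 f1 : List α)
    (h0 : ∀ y ∈ f0, before x y = false) (h1 : ∀ y ∈ f1, before x y = true) :
    PySem.List.insertBy before x (f0 ++ f1) = f0 ++ x :: f1 := by
  induction f0 with
  | nil =>
    cases f1 with
    | nil => simp [PySem.List.insertBy]
    | cons y ys => simp [PySem.List.insertBy, h1 y (by simp)]
  | cons a as ih =>
    simp only [List.cons_append, PySem.List.insertBy, h0 a (by simp)]
    simp [ih (fun y hy => h0 y (by simp [hy]))]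

-- the stable insertion sort with a 0/1 key IS the stable partition
theorem pv_sorted_partition {α : Type} (hit : α → Bool) (l : List α) :
    PySem.List.sorted l (fun x => if hit x then (0 : Int) else 1)
      = l.filter hit ++ l.filter (fun x => !hit x) := by
  rw [PySem.List.sorted_eq_foldl_insertBy]
  induction l using List.reverseRecOn with
  | nil => simp
  | append_singleton l x ih =>
    rw [List.foldl_append, List.foldl_cons, List.foldl_nil, ih]
    by_cases hx : hit x = true
    · rw [pv_insertBy_middle _ x _ _
        (by intro y hy; simp at hy; simp [hx, hy.2])
        (by intro y hy; simp at hy; simp [hx, hy.2])]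
      simp [hx, List.filter_append]
    · rw [PySem.List.insertBy_of_forall_not_before _ x _
        (by intro y hy; by_cases h : hit y <;> simp [hx, h])]
      simp [hx, List.filter_append]

-- A's partition loop, over any initial pair of accumulators
theorem pv_foldl_step (resultValue : String) (l : List (List String)) (a b : List (List String)) :
    l.foldl (pvStep resultValue) (a, b)
      = (a ++ l.filter (pvHit resultValue), b ++ l.filter (fun r => !pvHit resultValue r)) := by
  induction l generalizing a b with
  | nil => simp
  | cons r t ih =>
    by_cases hr : pvHit resultValue r = true
    · simp [pvStep, hr, ih]
    · simp [pvStep, hr, ih]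

-- ===== VERDICT (by name: the statement is the Claim_ definition above) =====
theorem setResultValueFirst_spec : Claim_equal_setResultValueFirst := by
  intro arrayData resultValue targetRow _ _
  unfold Spec_setResultValueFirst setResultValueFirst setResultValueFirst_alt
  simp only []
  rw [PySem.List.foldl_pyRange_zero_pyGetD' ((PySem.List.pyGet? arrayData targetRow).getD [])
      [] (pvStep resultValue) ([], []),
    pv_foldl_step, pv_sorted_partition (pvHit resultValue)]
  simp
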